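-- pv_equiv track=rewrite | github.com/adomakor412/interviews | Anagrams.py | getAnagram
-- ===== SOURCE A (Python) =====
-- from collections import Counter
--
-- def getAnagram(s):
--     #n = -1
--     length = len(s)
--     if length%2 != 0:
--         #pass
--         return -1
--     else:
--         first_half, second_half = s[:length//2], s[length//2:]
--
--         #Count frequencies
--         count1 = Counter(first_half)
--         count2 = Counter(second_half)
--
--         #Calculate replacements
--         n = 0
--         for digit in count1:
--             if count1[digit] > count2[digit]:
--                 n+= count1[digit] - count2[digit]
--         return n
-- ===== SOURCE B (Python) =====
-- def getAnagram(s):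
--     if len(s) % 2 != 0:
--         return -1
--     half = len(s) // 2
--     remaining = list(s[half:])
--     n = 0
--     for ch in s[:half]:
--         if ch in remaining:
--             remaining.remove(ch)
--         else:
--             n += 1
--     return n
-- ===== Notes on version B (the rewrite author's own statement) =====
-- stated objective: alternative
-- what changed: Replaces the two frequency Counters and the surplus-comparison loop by greedy one-to-one matching: each first-half character is matched against (and removed from) a shrinking pool of second-half characters, and the unmatched characters are counted.
import Mathlib
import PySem

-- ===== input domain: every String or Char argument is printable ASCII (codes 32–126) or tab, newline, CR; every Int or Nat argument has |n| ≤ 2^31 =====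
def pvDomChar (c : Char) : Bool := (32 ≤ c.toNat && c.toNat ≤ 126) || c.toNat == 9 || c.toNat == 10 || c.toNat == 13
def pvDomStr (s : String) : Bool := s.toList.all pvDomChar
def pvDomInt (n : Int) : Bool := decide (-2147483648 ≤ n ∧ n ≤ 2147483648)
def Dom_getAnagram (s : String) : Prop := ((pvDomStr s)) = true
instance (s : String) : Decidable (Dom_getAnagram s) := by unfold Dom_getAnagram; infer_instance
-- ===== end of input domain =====

-- B replaces A's two Counters plus surplus-comparison loop by greedy one-to-one matching against a shrinking pool; alternative algorithm, not faster.


-- ===== PORT A =====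
def getAnagram (s : String) : Int :=
  let cs := s.toList
  let length : Int := (cs.length : Int)
  if PySem.Int.mod length 2 ≠ 0 then -1
  else
    let first := PySem.List.slice cs none (some (PySem.Int.floordiv length 2))
    let second := PySem.List.slice cs (some (PySem.Int.floordiv length 2)) none
    let count1 := PySem.Dict.counter first
    let count2 := PySem.Dict.counter second
    count1.keys.foldl (fun n d =>
      if count1.getD d 0 > count2.getD d 0 then n + (count1.getD d 0 - count2.getD d 0) else n) 0

-- ===== PORT B =====
def getAnagram_alt (s : String) : Int :=
  let cs := s.toList
  let length : Int := (cs.length : Int)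
  if PySem.Int.mod length 2 ≠ 0 then -1
  else
    let half := PySem.Int.floordiv length 2
    let remaining := PySem.List.slice cs (some half) none
    let first := PySem.List.slice cs none (some half)
    (first.foldl (fun (st : List Char × Int) ch =>
      if ch ∈ st.1 then (st.1.erase ch, st.2) else (st.1, st.2 + 1)) (remaining, 0)).2

-- ===== PRECONDITION & SPEC =====
def Spec_getAnagram (s : String) (out : Int) : Prop := out = getAnagram_alt s
instance (s : String) (out : Int) : Decidable (Spec_getAnagram s out) := by unfold Spec_getAnagram; infer_instance

-- ===== CLAIM (what is proved, stated in full; the proofs are below) =====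
def Claim_equal_getAnagram : Prop := ∀ (s : String), Dom_getAnagram s → Spec_getAnagram s (getAnagram s)

-- ===== LEMMAS AND PROOFS =====

-- B's greedy loop counts the multiset difference first-half minus pool
theorem pvB_loop : ∀ (F R : List Char) (n : Int),
    (F.foldl (fun (st : List Char × Int) ch =>
        if ch ∈ st.1 then (st.1.erase ch, st.2) else (st.1, st.2 + 1)) (R, n)).2
    = n + ((((F : Multiset Char) - (R : Multiset Char)).card : Nat) : Int) := by
  intro F
  induction F with
  | nil => intro R n; simp
  | cons ch F ih =>
      intro R n
      simp only [List.foldl_cons]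
      by_cases h : ch ∈ R
      · rw [if_pos h, ih]
        congr 2
        have hco : ((ch :: F : List Char) : Multiset Char) - (R : Multiset Char)
            = (F : Multiset Char) - ((R.erase ch : List Char) : Multiset Char) := by
          ext a
          rw [Multiset.count_sub, Multiset.count_sub]
          simp only [Multiset.coe_count]
          have hcnt : 1 ≤ R.count ch := List.count_pos_iff.mpr h
          by_cases ha : a = ch
          · subst ha
            simp only [List.count_erase_self, List.count_cons_self]
            omega
          · simp only [List.count_erase_of_ne ha, List.count_cons, beq_iff_eq,
              if_neg (Ne.symm ha)]
            omega
        rw [hco]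
      · rw [if_neg h, ih]
        have hco : ((ch :: F : List Char) : Multiset Char) - (R : Multiset Char)
            = ch ::ₘ ((F : Multiset Char) - (R : Multiset Char)) := by
          ext a
          have hcnt : R.count ch = 0 := List.count_eq_zero.mpr h
          rw [Multiset.count_cons]
          rw [Multiset.count_sub, Multiset.count_sub]
          simp only [Multiset.coe_count]
          by_cases ha : a = ch
          · subst ha
            simp [hcnt]
          · simp only [List.count_cons, beq_iff_eq, if_neg (Ne.symm ha), if_neg ha]
            omega
        rw [hco, Multiset.card_cons]
        push_cast
        ring

-- sum of a pointwise sum of maps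
theorem pv_sum_map_add (f g : Char → Int) : ∀ (l : List Char),
    (l.map (fun c => f c + g c)).sum = (l.map f).sum + (l.map g).sum := by
  intro l
  induction l with
  | nil => simp
  | cons x l ih => simp [ih]; ring

-- over a nodup list containing a, the indicator sums to 1
theorem pv_ite_sum (a : Char) : ∀ (K : List Char), K.Nodup → a ∈ K →
    (K.map (fun c => if c = a then (1 : Int) else 0)).sum = 1 := by
  intro K
  induction K with
  | nil => intro _ h; cases h
  | cons k K ih =>
      intro hn hm
      simp only [List.map_cons, List.sum_cons]
      by_cases hk : k = a
      · subst hk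
        have hKa : k ∉ K := (List.nodup_cons.mp hn).1
        have hz : (K.map (fun c => if c = k then (1 : Int) else 0)).sum = 0 := by
          apply List.sum_eq_zero
          intro x hx
          obtain ⟨c, hc, rfl⟩ := List.mem_map.mp hx
          rw [if_neg (by rintro rfl; exact hKa hc)]
        rw [if_pos rfl, hz]
        ring
      · have hm' : a ∈ K := by
          cases hm with
          | head => exact absurd rfl hk
          | tail _ h => exact h
        rw [if_neg hk, ih (List.nodup_cons.mp hn).2 hm']
        ring

-- summing counts over a nodup list covering the support gives the card
theorem pv_sum_count (K : List Char) (hn : K.Nodup) : ∀ (A : Multiset Char),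
    (∀ a ∈ A, a ∈ K) →
    (K.map (fun c => ((A.count c : Nat) : Int))).sum = ((A.card : Nat) : Int) := by
  intro A
  induction A using Multiset.induction with
  | empty => intro _; simp
  | cons a A ih =>
      intro hmem
      have h1 : K.map (fun c => ((Multiset.count c (a ::ₘ A) : Nat) : Int))
          = K.map (fun c => ((A.count c : Nat) : Int) + (if c = a then (1 : Int) else 0)) := by
        apply List.map_congr_left
        intro c _
        rw [Multiset.count_cons]
        split_ifs <;> push_cast <;> ring
      rw [h1, pv_sum_map_add, ih (fun b hb => hmem b (Multiset.mem_cons_of_mem hb)),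
          pv_ite_sum a K hn (hmem a (Multiset.mem_cons_self a A)), Multiset.card_cons]
      push_cast
      ring

-- A's accumulating loop as a sum
theorem pv_foldl_if_sum (g : Char → Int) (P : Char → Prop) [DecidablePred P] :
    ∀ (l : List Char) (i : Int),
    l.foldl (fun n d => if P d then n + g d else n) i
      = i + (l.map (fun d => if P d then g d else 0)).sum := by
  intro l
  induction l with
  | nil => simp
  | cons x l ih =>
      intro i
      simp only [List.foldl_cons, List.map_cons, List.sum_cons, ih]
      by_cases h : P x
      · rw [if_pos h, if_pos h]; ring
      · rw [if_neg h, if_neg h]; ring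

-- A's surplus sum is the card of the multiset difference
theorem pvA_sum (F S : List Char) :
    ((PySem.Set.ofList F).map (fun c =>
        if ((S.count c : Nat) : Int) < ((F.count c : Nat) : Int)
        then ((F.count c : Nat) : Int) - ((S.count c : Nat) : Int) else 0)).sum
    = ((((F : Multiset Char) - (S : Multiset Char)).card : Nat) : Int) := by
  have h1 : (PySem.Set.ofList F).map (fun c =>
        if ((S.count c : Nat) : Int) < ((F.count c : Nat) : Int)
        then ((F.count c : Nat) : Int) - ((S.count c : Nat) : Int) else 0)
      = (PySem.Set.ofList F).map (fun c =>
        (((((F : Multiset Char) - (S : Multiset Char)).count c : Nat)) : Int)) := by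
    apply List.map_congr_left
    intro c _
    rw [Multiset.count_sub]
    simp only [Multiset.coe_count]
    split_ifs <;> omega
  rw [h1]
  apply pv_sum_count (PySem.Set.ofList F) (PySem.Set.nodup_ofList F)
  intro a ha
  have : 0 < Multiset.count a ((F : Multiset Char) - (S : Multiset Char)) :=
    Multiset.count_pos.mpr ha
  rw [Multiset.count_sub] at this
  simp only [Multiset.coe_count] at this
  have : a ∈ F := List.count_pos_iff.mp (by omega)
  simpa [PySem.Set.mem_ofList] using this

-- the two else-branch computations agree
theorem pv_core (F S : List Char) :
    ((PySem.Dict.counter F).keys.foldl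
      (fun n d =>
        if (PySem.Dict.counter F).getD d 0 > (PySem.Dict.counter S).getD d 0
        then n + ((PySem.Dict.counter F).getD d 0 - (PySem.Dict.counter S).getD d 0)
        else n) 0)
    = (F.foldl (fun (st : List Char × Int) ch =>
        if ch ∈ st.1 then (st.1.erase ch, st.2) else (st.1, st.2 + 1)) (S, 0)).2 := by
  rw [pvB_loop,
      pv_foldl_if_sum
        (fun d => (PySem.Dict.counter F).getD d 0 - (PySem.Dict.counter S).getD d 0)
        (fun d => (PySem.Dict.counter F).getD d 0 > (PySem.Dict.counter S).getD d 0),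
      PySem.Dict.keys_counter]
  simp only [PySem.Dict.getD_counter, gt_iff_lt]
  rw [pvA_sum F S]

-- ===== VERDICT (by name: the statement is the Claim_ definition above) =====
theorem getAnagram_spec : Claim_equal_getAnagram := by
  intro s _
  unfold Spec_getAnagram getAnagram getAnagram_alt
  by_cases h : PySem.Int.mod ((s.toList.length : Int)) 2 ≠ 0
  · simp only [if_pos h]
  · simp only [if_neg h]
    exact pv_core _ _
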